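-- pv_equiv track=rewrite | github.com/SharkoStepan/AOIS | lab3/minimizer.py | can_combine
-- ===== SOURCE A (Python) =====
-- from typing import List, Tuple, Set
--
-- def can_combine(a: str, b: str) -> Tuple[bool, str]:
--     diff = 0
--     combined = []
--     for bit_a, bit_b in zip(a, b):
--         if bit_a != bit_b:
--             diff += 1
--             combined.append('-')
--         else:
--             combined.append(bit_a)
--         if diff > 1:
--             return (False, '')
--     return (diff == 1, ''.join(combined))
-- ===== SOURCE B (Python) =====
-- def can_combine(a: str, b: str):
--     minlen = min(len(a), len(b))
--     diffs = [i for i in range(minlen) if a[i] != b[i]]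
--     if len(diffs) == 0:
--         return (False, a[:minlen])
--     if len(diffs) == 1:
--         i = diffs[0]
--         return (True, a[:i] + '-' + a[i + 1:minlen])
--     return (False, '')
-- ===== Notes on version B (the rewrite author's own statement) =====
-- stated objective: alternative
-- what changed: Instead of A's single fused loop that builds the output character list while counting mismatches with an early exit, B first collects the mismatch positions by scanning range(min-length) and then constructs the result purely by string slicing around the unique mismatch (or returns the common-length prefix / empty string).
import Mathlib
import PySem

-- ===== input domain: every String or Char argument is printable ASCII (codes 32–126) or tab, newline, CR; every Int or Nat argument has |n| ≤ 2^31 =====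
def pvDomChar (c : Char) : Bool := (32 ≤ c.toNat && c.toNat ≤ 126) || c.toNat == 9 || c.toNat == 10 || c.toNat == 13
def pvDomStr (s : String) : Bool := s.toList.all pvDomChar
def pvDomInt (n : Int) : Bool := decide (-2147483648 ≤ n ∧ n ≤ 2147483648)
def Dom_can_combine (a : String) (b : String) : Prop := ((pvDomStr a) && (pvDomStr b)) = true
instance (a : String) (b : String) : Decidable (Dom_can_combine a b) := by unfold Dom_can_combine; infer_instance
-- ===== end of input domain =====

-- B differs from A by first collecting the mismatch positions and then building the
-- result by slicing, instead of A's fused loop that counts and accumulates with early exit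
-- (objective: alternative decomposition, same cost). Both are total; return values only.

-- ===== PORT A =====
-- the for-loop over zip(a, b) carrying diff and the accumulated character list
def canCombineLoop : List (Char × Char) → Int → List Char → Bool × String
  | [], diff, combined => (diff == 1, String.mk combined)
  | (bit_a, bit_b) :: rest, diff, combined =>
    let st := if bit_a != bit_b then (diff + 1, combined ++ ['-']) else (diff, combined ++ [bit_a])
    if st.1 > 1 then (false, "") else canCombineLoop rest st.1 st.2

def can_combine (a : String) (b : String) : Bool × String :=
  canCombineLoop (a.toList.zip b.toList) 0 []

-- ===== PORT B =====
-- B: minlen = min(len a, len b); diffs = [i for i in range(minlen) if a[i] != b[i]];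
-- branch on len(diffs), building the output by slicing.
-- a[i] ported as getD i ' ' (exact: every i drawn from range minlen is in range);
-- a[:i], a[:minlen], a[i+1:minlen] ported as take/drop (exact: 0 ≤ i ≤ i+1 and minlen ≤ len a).
def can_combine_alt (a : String) (b : String) : Bool × String :=
  let la := a.toList
  let lb := b.toList
  let minlen := min la.length lb.length
  let diffs := (List.range minlen).filter (fun i => la.getD i ' ' != lb.getD i ' ')
  match diffs with
  | [] => (false, String.mk (la.take minlen))
  | [i] => (true, String.mk (la.take i ++ '-' :: (la.take minlen).drop (i + 1)))
  | _ => (false, "")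

-- ===== PRECONDITION & SPEC =====
def Spec_can_combine (a : String) (b : String) (out : Bool × String) : Prop := out = can_combine_alt a b
instance (a : String) (b : String) (out : Bool × String) : Decidable (Spec_can_combine a b out) := by unfold Spec_can_combine; infer_instance

-- ===== CLAIM (what is proved, stated in full; the proofs are below) =====
def Claim_equal_can_combine : Prop := ∀ (a : String) (b : String), Dom_can_combine a b → Spec_can_combine a b (can_combine a b)

-- ===== LEMMAS AND PROOFS =====

-- number of mismatching pairs
def pvMism (ps : List (Char × Char)) : Nat := ps.countP (fun p => p.1 != p.2)

-- the character list A's loop produces when it does not exit early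
def pvCmb (ps : List (Char × Char)) : List Char := ps.map (fun p => if p.1 != p.2 then '-' else p.1)

-- closed form both ports reach
def pvCF (ps : List (Char × Char)) : Bool × String :=
  if 2 ≤ pvMism ps then (false, "")
  else (decide (pvMism ps = 1), String.mk (pvCmb ps))

theorem pvLoop_closed (ps : List (Char × Char)) : ∀ (d : Nat) (acc : List Char), d ≤ 1 →
    canCombineLoop ps (d : Int) acc =
      (if 2 ≤ d + pvMism ps then (false, "")
       else (decide (d + pvMism ps = 1), String.mk (acc ++ pvCmb ps))) := by
  induction ps with
  | nil =>
    intro d acc hd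
    interval_cases d <;> simp [canCombineLoop, pvMism, pvCmb]
  | cons p rest ih =>
    obtain ⟨x, y⟩ := p
    intro d acc hd
    by_cases hxy : x = y
    · subst hxy
      simp only [canCombineLoop, bne_self_eq_false, if_false, Bool.false_eq_true]
      have h1 : ¬ ((d : Int) > 1) := by omega
      rw [if_neg h1, ih d (acc ++ [x]) hd]
      simp only [pvMism, pvCmb, List.append_assoc, List.countP_cons, bne_self_eq_false,
        List.map_cons, if_neg (by simp : ¬(x != x) = true), List.cons_append, List.nil_append]
      rfl
    · have hb : (x != y) = true := bne_iff_ne.mpr hxy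
      simp only [canCombineLoop, hb, if_true]
      have hm : pvMism ((x, y) :: rest) = pvMism rest + 1 := by
        simp [pvMism, List.countP_cons, hb]
      rcases Nat.lt_or_ge d 1 with hd0 | hd1
      · have hd' : d = 0 := by omega
        subst hd'
        simp only [Nat.cast_zero]
        have h1 : ¬ ((0 : Int) + 1 > 1) := by omega
        rw [if_neg h1]
        have hc : ((0 : Int) + 1) = ((1 : Nat) : Int) := by norm_num
        rw [hc, ih 1 (acc ++ ['-']) (le_refl 1)]
        simp only [hm]
        have harith : (1 + pvMism rest = 0 + (pvMism rest + 1)) := by omega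
        by_cases h2 : 2 ≤ 1 + pvMism rest
        · rw [if_pos h2, if_pos (by omega)]
        · rw [if_neg h2, if_neg (by omega)]
          have hm0 : pvMism rest = 0 := by omega
          simp [pvCmb, hxy, hm0, List.append_assoc]
      · have hd' : d = 1 := by omega
        subst hd'
        simp only [Nat.cast_one]
        have h1 : ((1 : Int) + 1 > 1) := by omega
        rw [if_pos h1, if_pos (by omega : 2 ≤ 1 + pvMism ((x, y) :: rest))]

theorem pvA_closed (a b : String) : can_combine a b = pvCF (a.toList.zip b.toList) := by
  unfold can_combine pvCF
  have h := pvLoop_closed (a.toList.zip b.toList) 0 [] (by omega)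
  simp only [Nat.cast_zero] at h
  rw [h]
  simp

theorem pvZip_eq_range_map (la lb : List Char) :
    la.zip lb = (List.range (min la.length lb.length)).map
      (fun i => (la.getD i ' ', lb.getD i ' ')) := by
  apply List.ext_getElem
  · simp
  · intro i h1 h2
    simp only [List.length_zip] at h1
    rw [List.getElem_zip, List.getElem_map, List.getElem_range,
      List.getD_eq_getElem la ' ' (by omega), List.getD_eq_getElem lb ' ' (by omega)]

theorem pvMism_eq_diffs_length (la lb : List Char) :
    ((List.range (min la.length lb.length)).filter
        (fun i => la.getD i ' ' != lb.getD i ' ')).length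
      = pvMism (la.zip lb) := by
  rw [pvMism, pvZip_eq_range_map, List.countP_map, List.countP_eq_length_filter]
  rfl

theorem pvCmb_zero (ps : List (Char × Char)) (h : pvMism ps = 0) :
    pvCmb ps = ps.map Prod.fst := by
  unfold pvCmb
  apply List.map_congr_left
  intro p hp
  have := List.countP_eq_zero.mp h p hp
  simp at this
  simp [this]

theorem pvZip_map_fst (la lb : List Char) :
    (la.zip lb).map Prod.fst = la.take (min la.length lb.length) := by
  apply List.ext_getElem
  · simp
  · intro i h1 h2
    simp only [List.length_map, List.length_zip] at h1
    rw [List.getElem_map, List.getElem_zip, List.getElem_take]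

theorem pvCmb_one (la lb : List Char) (i : Nat)
    (hi : i < min la.length lb.length)
    (hpi : (la.getD i ' ' != lb.getD i ' ') = true)
    (huniq : ∀ j, j < min la.length lb.length → j ≠ i → (la.getD j ' ' != lb.getD j ' ') = false) :
    pvCmb (la.zip lb) =
      la.take i ++ '-' :: (la.take (min la.length lb.length)).drop (i + 1) := by
  have hn1 : min la.length lb.length ≤ la.length := Nat.min_le_left _ _
  rw [pvCmb, pvZip_eq_range_map, List.map_map]
  apply List.ext_getElem
  · simp
    omega
  · intro j h1 h2
    simp only [List.length_map, List.length_range] at h1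
    rw [List.getElem_map, List.getElem_range]
    simp only [Function.comp_apply]
    rcases lt_trichotomy j i with hj | hj | hj
    · rw [List.getElem_append_left (by simp only [List.length_take]; omega), List.getElem_take]
      have hp := huniq j (by omega) (by omega)
      rw [if_neg (by rw [hp]; simp), List.getD_eq_getElem la ' ' (by omega)]
    · subst hj
      rw [List.getElem_append_right (by simp only [List.length_take]; omega)]
      have h0 : j - (List.take j la).length = 0 := by simp only [List.length_take]; omega
      simp only [h0, List.getElem_cons_zero]
      rw [if_pos hpi]
    · rw [List.getElem_append_right (by simp only [List.length_take]; omega)]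
      have h1' : j - (List.take i la).length = (j - i - 1) + 1 := by simp only [List.length_take]; omega
      simp only [h1', List.getElem_cons_succ, List.getElem_drop, List.getElem_take]
      have hp := huniq j (by omega) (by omega)
      rw [if_neg (by rw [hp]; simp)]
      simp only [show i + 1 + (j - i - 1) = j by omega]
      rw [List.getD_eq_getElem la ' ' (by omega)]

theorem pvB_list (la lb : List Char) :
    (match ((List.range (min la.length lb.length)).filter
        (fun i => la.getD i ' ' != lb.getD i ' ')) with
      | [] => ((false : Bool), String.mk (la.take (min la.length lb.length)))
      | [i] => (true, String.mk (la.take i ++ '-' :: (la.take (min la.length lb.length)).drop (i + 1)))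
      | _ => (false, "")) = pvCF (la.zip lb) := by
  have hlen := pvMism_eq_diffs_length la lb
  cases hds : (List.range (min la.length lb.length)).filter
      (fun i => la.getD i ' ' != lb.getD i ' ') with
  | nil =>
    rw [hds] at hlen
    simp only [List.length_nil] at hlen
    unfold pvCF
    rw [if_neg (by omega), pvCmb_zero _ (by omega), pvZip_map_fst]
    simp
    omega
  | cons i tl =>
    cases tl with
    | nil =>
      rw [hds] at hlen
      simp only [List.length_cons, List.length_nil] at hlen
      have hi : i ∈ (List.range (min la.length lb.length)).filter
          (fun k => la.getD k ' ' != lb.getD k ' ') := by rw [hds]; simp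
      rw [List.mem_filter, List.mem_range] at hi
      have huniq : ∀ j, j < min la.length lb.length → j ≠ i →
          (la.getD j ' ' != lb.getD j ' ') = false := by
        intro j hj hji
        by_contra hc
        have hjm : j ∈ (List.range (min la.length lb.length)).filter
            (fun k => la.getD k ' ' != lb.getD k ' ') := by
          rw [List.mem_filter, List.mem_range]
          exact ⟨hj, by revert hc; cases (la.getD j ' ' != lb.getD j ' ') <;> simp⟩
        rw [hds, List.mem_singleton] at hjm
        exact hji hjm
      unfold pvCF
      rw [if_neg (by omega), pvCmb_one la lb i hi.1 hi.2 huniq]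
      simp
      omega
    | cons j tl2 =>
      rw [hds] at hlen
      simp only [List.length_cons] at hlen
      unfold pvCF
      rw [if_pos (by omega)]

theorem pvB_closed (a b : String) : can_combine_alt a b = pvCF (a.toList.zip b.toList) := by
  exact pvB_list a.toList b.toList

-- ===== VERDICT (by name: the statement is the Claim_ definition above) =====
theorem can_combine_spec : Claim_equal_can_combine := by
  intro a b _
  unfold Spec_can_combine
  rw [pvA_closed, pvB_closed]
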